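-- pv_equiv track=rewrite | github.com/ManuelJager/Advent-of-code-2019 | day7/day7.py | getUniqueSequences
-- ===== SOURCE A (Python) =====
-- def getUniqueSequences(seqSet, seqLength):
--     sequences = []
--     def appendToSequence(seqSet, prefix, seqSetLength, remainingSeqLength):
--         if (remainingSeqLength == 0) :
--             sequences.append(prefix)
--             return
--
--         for i in range(seqSetLength):
--             char = seqSet[i]
--             if char in prefix :
--                 continue
--             newPrefix = prefix + char
--             appendToSequence(seqSet, newPrefix, seqSetLength, remainingSeqLength - 1)
--
--     appendToSequence(seqSet, "", len(seqSet), seqLength)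
--     return sequences
-- ===== SOURCE B (Python) =====
-- def getUniqueSequences(seqSet, seqLength):
--     if seqLength < 0:
--         return []
--     level = [""]
--     for _ in range(seqLength):
--         if not level:
--             break
--         level = [p + c for p in level for c in seqSet if c not in p]
--     return level
-- ===== Notes on version B (the rewrite author's own statement) =====
-- stated objective: simpler
-- what changed: A's nested recursive DFS helper appending to a shared mutable list is replaced by an iterative breadth-first expansion: start from [""] and, seqLength times, extend every prefix by each not-yet-used character of seqSet, which yields the same list in the same order.
import Mathlib
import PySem

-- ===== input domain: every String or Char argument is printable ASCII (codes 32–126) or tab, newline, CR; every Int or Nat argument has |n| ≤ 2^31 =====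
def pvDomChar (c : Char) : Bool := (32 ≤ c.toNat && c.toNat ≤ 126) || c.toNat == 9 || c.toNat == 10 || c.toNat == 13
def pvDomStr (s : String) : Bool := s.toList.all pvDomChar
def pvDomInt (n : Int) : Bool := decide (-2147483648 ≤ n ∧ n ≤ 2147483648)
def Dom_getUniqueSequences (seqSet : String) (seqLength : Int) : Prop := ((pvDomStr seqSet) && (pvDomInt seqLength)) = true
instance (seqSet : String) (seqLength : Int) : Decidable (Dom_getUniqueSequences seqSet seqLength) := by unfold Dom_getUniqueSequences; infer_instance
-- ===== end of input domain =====

-- B replaces A's recursive DFS helper by an iterative level-by-level expansion of the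
-- prefix list (objective: simpler); both are total and agree on every input.

-- ===== PORT A =====
-- Termination fact for A's helper, cited by name in its decreasing_by: extending the
-- prefix with a char of s not yet in it strictly shrinks the unused chars of s.
theorem pvFilterLt (pre : List Char) (x : Char) (s : List Char) (hs : x ∈ s) (hp : x ∉ pre) :
    (s.filter fun c => !((pre ++ [x]).contains c)).length < (s.filter fun c => !pre.contains c).length := by
  induction s with
  | nil => cases hs
  | cons a t ih =>
    by_cases ha : a = x
    · subst ha
      have h1 : ((a :: t).filter fun c => !((pre ++ [a]).contains c))
          = t.filter fun c => !((pre ++ [a]).contains c) := by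
        simp [List.contains_eq_mem]
      have h2 : ((a :: t).filter fun c => !pre.contains c)
          = a :: (t.filter fun c => !pre.contains c) := by
        simp [List.contains_eq_mem, hp]
      have hle : (t.filter fun c => !((pre ++ [a]).contains c)).length ≤ (t.filter fun c => !pre.contains c).length := by
        apply List.Sublist.length_le
        apply List.monotone_filter_right
        intro c hc
        simp only [List.contains_eq_mem, Bool.not_eq_true', decide_eq_false_iff_not, List.mem_append, List.mem_singleton] at hc ⊢
        exact fun h => hc (Or.inl h)
      rw [h1, h2]
      simp only [List.length_cons]
      omega
    · have hx : x ∈ t := by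
        rcases List.mem_cons.mp hs with h | h
        · exact absurd h (fun h' => ha h'.symm)
        · exact h
      have := ih hx
      by_cases hpa : a ∈ pre
      · simpa [List.filter, List.contains_eq_mem, hpa, ha] using this
      · simpa [List.filter, List.contains_eq_mem, hpa, ha] using Nat.succ_lt_succ this

-- A's inner recursive helper `appendToSequence`: prefixes are lists of chars (joined to a
-- String at the very end); the shared mutable `sequences` list becomes the concatenation
-- (flatMap, in the same left-to-right index order as A's `for i in range(seqSetLength)`)
-- of the recursive calls' results. `s.attach` only carries the membership fact needed for
-- the termination proof; the computation is the same.
def pvAppendA (s : List Char) (pre : List Char) (rem : Int) : List (List Char) :=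
  if rem = 0 then [pre]
  else
    s.attach.flatMap (fun c =>
      if c.1 ∈ pre then []
      else pvAppendA s (pre ++ [c.1]) (rem - 1))
termination_by (s.filter (fun c => !pre.contains c)).length
decreasing_by
  exact pvFilterLt pre c.1 s c.2 (by assumption)

def getUniqueSequences (seqSet : String) (seqLength : Int) : List String :=
  (pvAppendA seqSet.toList [] seqLength).map String.ofList

-- ===== PORT B =====
-- one level-expansion step: the comprehension [p + c for p in level for c in seqSet if c not in p]
def pvStep (s : List Char) (level : List (List Char)) : List (List Char) :=
  level.flatMap (fun p => s.flatMap (fun c => if c ∈ p then [] else [p ++ [c]]))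

-- B's for-loop with its early exit `if not level: break`
def pvLoop (s : List Char) : Nat → List (List Char) → List (List Char)
  | 0, level => level
  | n + 1, level => if level = [] then level else pvLoop s n (pvStep s level)

def getUniqueSequences_alt (seqSet : String) (seqLength : Int) : List String :=
  if seqLength < 0 then []
  else (pvLoop seqSet.toList seqLength.toNat [([] : List Char)]).map String.ofList

-- ===== PRECONDITION & SPEC =====
def Spec_getUniqueSequences (seqSet : String) (seqLength : Int) (out : List String) : Prop := out = getUniqueSequences_alt seqSet seqLength
instance (seqSet : String) (seqLength : Int) (out : List String) : Decidable (Spec_getUniqueSequences seqSet seqLength out) := by unfold Spec_getUniqueSequences; infer_instance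

-- ===== CLAIM (what is proved, stated in full; the proofs are below) =====
def Claim_equal_getUniqueSequences : Prop := ∀ (seqSet : String) (seqLength : Int), Dom_getUniqueSequences seqSet seqLength → Spec_getUniqueSequences seqSet seqLength (getUniqueSequences seqSet seqLength)

-- ===== LEMMAS AND PROOFS =====

-- with a negative remaining length A's helper never reaches 0, so it emits nothing
theorem pvAppendA_neg (s : List Char) (pre : List Char) (rem : Int) (h : rem < 0) :
    pvAppendA s pre rem = [] := by
  fun_induction pvAppendA s pre rem with
  | case1 => omega
  | case2 pre rem h0 ih =>
    apply List.flatMap_eq_nil_iff.mpr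
    intro c hc
    split
    · rfl
    · next hcp => exact ih c hcp (by omega)

theorem pvLoopNil (s : List Char) (n : ℕ) : pvLoop s n [] = [] := by
  cases n <;> simp [pvLoop]

-- B's loop (which merely stops early once the level is empty) is plain iteration of pvStep
theorem pvLoopIter (s : List Char) (n : ℕ) (lv : List (List Char)) :
    pvLoop s n lv = (pvStep s)^[n] lv := by
  induction n generalizing lv with
  | zero => rfl
  | succ n ih =>
    rw [pvLoop, Function.iterate_succ_apply]
    split
    · next hlv =>
      subst hlv
      have h0 : pvStep s [] = [] := rfl
      rw [h0, ← ih [], pvLoopNil]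
    · exact ih (pvStep s lv)

-- main invariant: expanding every prefix of a level by A's DFS to depth n
-- equals n iterations of B's level-expansion step
theorem pvMain (s : List Char) (n : ℕ) (lv : List (List Char)) :
    lv.flatMap (fun p => pvAppendA s p (n : Int)) = (pvStep s)^[n] lv := by
  induction n generalizing lv with
  | zero =>
    simp [pvAppendA]
  | succ n ih =>
    have hne : ((n : Int) + 1) ≠ 0 := by omega
    rw [Function.iterate_succ_apply, ← ih (pvStep s lv)]
    simp only [pvStep, List.flatMap_assoc]
    apply List.flatMap_congr
    intro p _
    rw [pvAppendA]
    push_cast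
    rw [if_neg hne]
    simp only [List.flatMap_subtype, List.unattach_attach, add_sub_cancel_right]
    apply List.flatMap_congr
    intro c _
    split <;> simp

-- ===== VERDICT (by name: the statement is the Claim_ definition above) =====
theorem getUniqueSequences_spec : Claim_equal_getUniqueSequences := by
  intro seqSet seqLength _
  unfold Spec_getUniqueSequences getUniqueSequences getUniqueSequences_alt
  by_cases hneg : seqLength < 0
  · rw [if_pos hneg, pvAppendA_neg _ _ _ hneg]; rfl
  · rw [if_neg hneg, pvLoopIter]
    have hk : (seqLength.toNat : Int) = seqLength := Int.toNat_of_nonneg (by omega)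
    have h := pvMain seqSet.toList seqLength.toNat [([] : List Char)]
    rw [hk] at h
    rw [← h]
    simp
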